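-- pv_equiv track=rewrite | github.com/Law-AI/ilsic | Codes/ILSIC/Ablation Study/Ablation Study on RAG Setups/RAG_k_stat_from_QQ-sBert-updated.py | ids_to_full_citations
-- ===== SOURCE A (Python) =====
-- from typing import List, Dict, Any, Optional, Tuple
--
-- def ids_to_full_citations(
--     cand_ids: List[str],
--     id2full: Dict[str, Dict[str, str]]
-- ) -> Tuple[List[str], List[Dict[str, str]]]:
--
--     out, misses, seen = [], [], set()
--     for cid in cand_ids:
--         meta = id2full.get(str(cid).strip())
--         if meta:
--             full = meta["full"]
--             if full and full not in seen:
--                 seen.add(full)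
--                 out.append(full)
--         else:
--             misses.append({"id": cid, "reason": "id not found"})
--     return out, misses
-- ===== SOURCE B (Python) =====
-- def ids_to_full_citations(cand_ids, id2full):
--     misses = [{"id": cid, "reason": "id not found"}
--               for cid in cand_ids if not id2full.get(str(cid).strip())]
--     fulls = [full for cid in cand_ids
--              if (meta := id2full.get(str(cid).strip())) and (full := meta["full"])]
--     return list(dict.fromkeys(fulls)), misses
-- ===== Notes on version B (the rewrite author's own statement) =====
-- stated objective: idiomatic
-- what changed: Replaced the single interleaved loop maintaining out/misses/seen with two declarative passes (a comprehension for misses, a comprehension for the truthy full values) followed by an order-preserving dict.fromkeys dedup.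
import Mathlib
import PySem

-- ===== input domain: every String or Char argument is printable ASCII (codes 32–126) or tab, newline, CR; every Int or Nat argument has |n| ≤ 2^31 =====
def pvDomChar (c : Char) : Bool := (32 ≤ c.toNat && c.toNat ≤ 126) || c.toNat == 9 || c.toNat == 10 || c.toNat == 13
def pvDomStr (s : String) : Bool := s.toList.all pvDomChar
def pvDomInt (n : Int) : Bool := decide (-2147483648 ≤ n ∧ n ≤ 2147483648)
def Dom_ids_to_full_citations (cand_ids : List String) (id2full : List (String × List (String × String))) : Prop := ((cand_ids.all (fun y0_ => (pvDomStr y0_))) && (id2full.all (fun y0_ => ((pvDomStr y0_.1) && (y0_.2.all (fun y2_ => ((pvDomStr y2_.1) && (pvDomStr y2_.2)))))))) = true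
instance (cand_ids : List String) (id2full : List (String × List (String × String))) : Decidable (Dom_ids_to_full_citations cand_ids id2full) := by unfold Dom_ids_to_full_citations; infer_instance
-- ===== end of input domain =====

-- B replaces A's interleaved loop (out/misses/seen) by two declarative passes plus a
-- dict.fromkeys-style order-preserving dedup; same cost, more idiomatic.

-- ===== PORT A =====
-- the body of A's loop; state = (out, misses, seen).
-- mta["full"] is ported as get? … |>.getD "" — Python raises KeyError there; Pre_ excludes those inputs.
def pvStepA (id2full : List (String × List (String × String)))
    (st : List String × List (List (String × String)) × PySem.Set String) (cid : String) :
    List String × List (List (String × String)) × PySem.Set String :=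
  let (out, misses, seen) := st
  match (PySem.Dict.mk id2full).get? (PySem.Str.strip cid) with
  | some mta =>
      if mta.isEmpty then
        (out, misses ++ [[("id", cid), ("reason", "id not found")]], seen)
      else
        let full := ((PySem.Dict.mk mta).get? "full").getD ""
        if full ≠ "" ∧ ¬ PySem.Set.contains seen full then
          (out ++ [full], misses, PySem.Set.add seen full)
        else (out, misses, seen)
  | none => (out, misses ++ [[("id", cid), ("reason", "id not found")]], seen)

def ids_to_full_citations (cand_ids : List String) (id2full : List (String × List (String × String))) : List String × (List (List (String × String))) :=
  let st := cand_ids.foldl (pvStepA id2full) ([], [], PySem.Set.empty)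
  (st.1, st.2.1)

-- ===== PORT B =====
-- B's second comprehension: the truthy full value of a found id, if any
def pvFullOf (id2full : List (String × List (String × String))) (cid : String) : Option String :=
  match (PySem.Dict.mk id2full).get? (PySem.Str.strip cid) with
  | some mta =>
      if mta.isEmpty then none
      else
        let full := ((PySem.Dict.mk mta).get? "full").getD ""
        if full = "" then none else some full
  | none => none

-- B's first comprehension's filter: the stripped-key lookup is falsy (missing or empty dict)
def pvIsMiss (id2full : List (String × List (String × String))) (cid : String) : Bool :=
  match (PySem.Dict.mk id2full).get? (PySem.Str.strip cid) with
  | some mta => mta.isEmpty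
  | none => true

def ids_to_full_citations_alt (cand_ids : List String) (id2full : List (String × List (String × String))) : List String × (List (List (String × String))) :=
  let misses := (cand_ids.filter (pvIsMiss id2full)).map
      (fun cid => [("id", cid), ("reason", "id not found")])
  let fulls := cand_ids.filterMap (pvFullOf id2full)
  (PySem.List.dedup fulls, misses)

-- ===== PRECONDITION & SPEC =====
-- Pre_ excludes exactly the inputs where Python A raises KeyError: some cid whose stripped key
-- is found with a truthy (non-empty) mta dict lacking the "full" key.  (B raises there too.)
def Pre_ids_to_full_citations (cand_ids : List String) (id2full : List (String × List (String × String))) : Prop :=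
  (cand_ids.all (fun cid =>
    match (PySem.Dict.mk id2full).get? (PySem.Str.strip cid) with
    | some mta => mta.isEmpty || ((PySem.Dict.mk mta).get? "full").isSome
    | none => true)) = true
instance (cand_ids : List String) (id2full : List (String × List (String × String))) : Decidable (Pre_ids_to_full_citations cand_ids id2full) := by unfold Pre_ids_to_full_citations; infer_instance

def pvWitness_ids_to_full_citations : List String × (List (String × List (String × String))) :=
  (["a", " b ", "c", "a"], [("a", [("full", "Cite A")]), ("b", [("full", "Cite A")]), ("d", [])])

def Spec_ids_to_full_citations (cand_ids : List String) (id2full : List (String × List (String × String))) (out : List String × (List (List (String × String)))) : Prop := out = ids_to_full_citations_alt cand_ids id2full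
instance (cand_ids : List String) (id2full : List (String × List (String × String))) (out : List String × (List (List (String × String)))) : Decidable (Spec_ids_to_full_citations cand_ids id2full out) := by unfold Spec_ids_to_full_citations; infer_instance

-- ===== CLAIM (what is proved, stated in full; the proofs are below) =====
def Claim_equal_ids_to_full_citations : Prop := ∀ (cand_ids : List String) (id2full : List (String × List (String × String))), Dom_ids_to_full_citations cand_ids id2full → Pre_ids_to_full_citations cand_ids id2full → Spec_ids_to_full_citations cand_ids id2full (ids_to_full_citations cand_ids id2full)

-- ===== LEMMAS AND PROOFS =====

lemma pvStepA_miss (id2full : List (String × List (String × String)))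
    (s : PySem.Set String) (ms : List (List (String × String))) (t : PySem.Set String)
    (cid : String) (h : pvIsMiss id2full cid = true) :
    pvStepA id2full (s, ms, t) cid = (s, ms ++ [[("id", cid), ("reason", "id not found")]], t) := by
  unfold pvStepA pvIsMiss at *
  cases hg : (PySem.Dict.mk id2full).get? (PySem.Str.strip cid) with
  | none => simp
  | some mta => rw [hg] at h; simp [h]

lemma pvStepA_found (id2full : List (String × List (String × String)))
    (s : PySem.Set String) (ms : List (List (String × String)))
    (cid full : String) (h : pvFullOf id2full cid = some full) :
    pvStepA id2full (s, ms, s) cid = (PySem.Set.add s full, ms, PySem.Set.add s full) := by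
  unfold pvStepA pvFullOf at *
  cases hg : (PySem.Dict.mk id2full).get? (PySem.Str.strip cid) with
  | none => rw [hg] at h; simp at h
  | some mta =>
    rw [hg] at h
    by_cases he : mta.isEmpty
    · simp [he] at h
    · simp only [he, Bool.false_eq_true, if_false] at h ⊢
      by_cases hf : ((PySem.Dict.mk mta).get? "full").getD "" = ""
      · simp [hf] at h
      · simp only [hf, if_false, Option.some.injEq] at h
        subst h
        by_cases hc : ((PySem.Dict.mk mta).get? "full").getD "" ∈ s
        · simp [PySem.Set.add, PySem.Set.contains, hf, hc]
        · simp [PySem.Set.add, PySem.Set.contains, hf, hc]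

lemma pvStepA_dup (id2full : List (String × List (String × String)))
    (s : PySem.Set String) (ms : List (List (String × String)))
    (cid : String) (hm : pvIsMiss id2full cid = false) (hf : pvFullOf id2full cid = none) :
    pvStepA id2full (s, ms, s) cid = (s, ms, s) := by
  unfold pvStepA pvFullOf pvIsMiss at *
  cases hg : (PySem.Dict.mk id2full).get? (PySem.Str.strip cid) with
  | none => rw [hg] at hm; simp at hm
  | some mta =>
    rw [hg] at hm hf
    simp only [hm, Bool.false_eq_true, if_false] at hf ⊢
    by_cases he : ((PySem.Dict.mk mta).get? "full").getD "" = ""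
    · simp [he]
    · simp [he] at hf

-- A's loop keeps seen equal (as a list) to out; with that invariant its final state is
-- B's misses appended and B's fulls folded through Set.add.
lemma pv_loop (id2full : List (String × List (String × String))) :
    ∀ (rest : List String) (s : PySem.Set String) (ms : List (List (String × String))),
    rest.foldl (pvStepA id2full) (s, ms, s)
    = ((rest.filterMap (pvFullOf id2full)).foldl PySem.Set.add s,
       ms ++ (rest.filter (pvIsMiss id2full)).map (fun cid => [("id", cid), ("reason", "id not found")]),
       (rest.filterMap (pvFullOf id2full)).foldl PySem.Set.add s) := by
  intro rest
  induction rest with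
  | nil => intro s ms; simp
  | cons cid rest ih =>
    intro s ms
    rw [List.foldl_cons, List.filterMap_cons, List.filter_cons]
    by_cases hm : pvIsMiss id2full cid = true
    · have hf : pvFullOf id2full cid = none := by
        unfold pvIsMiss at hm; unfold pvFullOf
        cases hg : (PySem.Dict.mk id2full).get? (PySem.Str.strip cid) with
        | none => simp
        | some mta => rw [hg] at hm; simp [hm]
      rw [pvStepA_miss id2full s ms s cid hm, ih]
      simp [hm, hf]
    · have hm' : pvIsMiss id2full cid = false := by simpa using hm
      cases hf : pvFullOf id2full cid with
      | none =>
        rw [pvStepA_dup id2full s ms cid hm' hf, ih]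
        simp [hm']
      | some full =>
        rw [pvStepA_found id2full s ms cid full hf, ih]
        simp [hm']

-- ===== VERDICT (by name: the statement is the Claim_ definition above) =====
theorem ids_to_full_citations_spec : Claim_equal_ids_to_full_citations := by
  intro cand_ids id2full _ _
  show _ = _
  unfold ids_to_full_citations ids_to_full_citations_alt
  rw [show (PySem.Set.empty : PySem.Set String) = [] from rfl,
      pv_loop id2full cand_ids [] []]
  simp [PySem.List.dedup_eq_ofList, PySem.Set.ofList_eq_foldl]
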